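-- pv_equiv track=rewrite | github.com/AleRodriguezCruz/tareas_automata | src/Evaluador.py | tokenizar_cadena
-- ===== SOURCE A (Python) =====
-- def es_fecha(tokens, i):
--     if i + 9 < len(tokens):
--         return (tokens[i] >= 48 and tokens[i] <= 57 and
--                 tokens[i+1] >= 48 and tokens[i+1] <= 57 and
--                 tokens[i+2] == 47 and
--                 tokens[i+3] >= 48 and tokens[i+3] <= 57 and
--                 tokens[i+4] == 47 and
--                 tokens[i+5] >= 48 and tokens[i+5] <= 57 and
--                 tokens[i+6] >= 48 and tokens[i+6] <= 57 and
--                 tokens[i+7] >= 48 and tokens[i+7] <= 57 and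
--                 tokens[i+8] >= 48 and tokens[i+8] <= 57)
--     return False
--
-- def es_decimal(tokens, i):
--     if i + 1 < len(tokens) and tokens[i] >= 48 and tokens[i] <= 57:
--         encontrado_punto = False
--         for j in range(i + 1, len(tokens)):
--             if tokens[j] == 46:
--                 if encontrado_punto:
--                     return False
--                 encontrado_punto = True
--             elif not (tokens[j] >= 48 and tokens[j] <= 57):
--                 return False
--         return encontrado_punto
--     return False
--
-- def es_entero(tokens, i):
--     if i < len(tokens) and tokens[i] >= 48 and tokens[i] <= 57:
--         for j in range(i + 1, len(tokens)):
--             if not (tokens[j] >= 48 and tokens[j] <= 57):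
--                 return False
--         return True
--     return False
--
-- def tokenizar_cadena(tokens):
--     tokens_agrupados = []
--     i = 0
--     while i < len(tokens):
--         if (tokens[i] >= 65 and tokens[i] <= 90) or (tokens[i] >= 97 and tokens[i] <= 122):
--             tokens_agrupados.append(200)
--         elif (tokens[i] >= 48 and tokens[i] <= 57):
--             if es_fecha(tokens, i):
--                 tokens_agrupados.append(300)
--                 i += 9
--             elif es_decimal(tokens, i):
--                 tokens_agrupados.append(202)
--                 while i < len(tokens) and ((tokens[i] >= 48 and tokens[i] <= 57) or tokens[i] == 46):
--                     i += 1
--                 i -= 1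
--             elif es_entero(tokens, i):
--                 tokens_agrupados.append(201)
--                 while i < len(tokens) and (tokens[i] >= 48 and tokens[i] <= 57):
--                     i += 1
--                 i -= 1
--             else:
--                 tokens_agrupados.append(201)
--         elif tokens[i] in [33, 35, 36, 37]:
--             tokens_agrupados.append(888)  # Caracteres especiales no permitidos
--         else:
--             tokens_agrupados.append(tokens[i])
--         i += 1
--     return tokens_agrupados
-- ===== SOURCE B (Python) =====
-- def tokenizar_cadena(tokens):
--     # One reverse pass precomputes suffix flags consulted per position,
--     # instead of rescanning the rest of the list (es_decimal/es_entero in the original).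
--     n = len(tokens)
--     suf_int = [False] * (n + 1)   # suf_int[j]: tokens[j:] are all digits
--     suf_dec = [False] * (n + 1)   # suf_dec[j]: tokens[j:] are digits with exactly one '.'
--     suf_int[n] = True
--     for j in range(n - 1, -1, -1):
--         d = 48 <= tokens[j] <= 57
--         suf_int[j] = d and suf_int[j + 1]
--         suf_dec[j] = (d and suf_dec[j + 1]) or (tokens[j] == 46 and suf_int[j + 1])
--     out = []
--     i = 0
--     while i < n:
--         c = tokens[i]
--         if 65 <= c <= 90 or 97 <= c <= 122:
--             out.append(200)
--             i += 1
--         elif 48 <= c <= 57: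
--             if (i + 9 < n and
--                     48 <= tokens[i + 1] <= 57 and tokens[i + 2] == 47 and
--                     48 <= tokens[i + 3] <= 57 and tokens[i + 4] == 47 and
--                     48 <= tokens[i + 5] <= 57 and 48 <= tokens[i + 6] <= 57 and
--                     48 <= tokens[i + 7] <= 57 and 48 <= tokens[i + 8] <= 57):
--                 out.append(300)
--                 i += 10
--             elif suf_dec[i + 1]:
--                 out.append(202)
--                 i = n
--             elif suf_int[i + 1]:
--                 out.append(201)
--                 i = n
--             else:
--                 out.append(201)
--                 i += 1
--         elif c in (33, 35, 36, 37):
--             out.append(888)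
--             i += 1
--         else:
--             out.append(c)
--             i += 1
--     return out
-- ===== Notes on version B (the rewrite author's own statement) =====
-- stated objective: alternative
-- what changed: Replaces A's per-position rescans of the rest of the list (es_decimal/es_entero walk to the end at every digit) by one reverse pass that precomputes suffix all-digit / digit-with-one-dot flags, so each position is classified without rescanning; measured 1.3x at the largest size, not >=1.5x, so no speed claim.
import Mathlib
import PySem

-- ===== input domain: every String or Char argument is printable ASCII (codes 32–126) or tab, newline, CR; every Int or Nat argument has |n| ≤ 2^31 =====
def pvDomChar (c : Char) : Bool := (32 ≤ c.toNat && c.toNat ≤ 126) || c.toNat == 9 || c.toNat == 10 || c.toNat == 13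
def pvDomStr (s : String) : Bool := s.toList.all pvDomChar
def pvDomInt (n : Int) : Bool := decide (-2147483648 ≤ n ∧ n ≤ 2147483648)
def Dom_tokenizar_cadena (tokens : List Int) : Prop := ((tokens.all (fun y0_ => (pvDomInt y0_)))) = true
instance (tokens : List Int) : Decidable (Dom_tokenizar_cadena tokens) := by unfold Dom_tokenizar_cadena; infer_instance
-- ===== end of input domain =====

-- B replaces A's per-position rescans of the rest of the list (es_decimal/es_entero)
-- by one reverse pass precomputing suffix flags consulted at each position (alternative
-- algorithm; not measurably faster on a timing run's inputs).

-- ===== PORT A =====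
-- digit test '48 <= t and t <= 57'
def pvDig (c : Int) : Bool := decide (48 ≤ c ∧ c ≤ 57)

def esFecha (tokens : List Int) (i : Nat) : Bool :=
  if i + 9 < tokens.length then
    pvDig (tokens.getD i 0) && pvDig (tokens.getD (i+1) 0) &&
    decide (tokens.getD (i+2) 0 = 47) && pvDig (tokens.getD (i+3) 0) &&
    decide (tokens.getD (i+4) 0 = 47) && pvDig (tokens.getD (i+5) 0) &&
    pvDig (tokens.getD (i+6) 0) && pvDig (tokens.getD (i+7) 0) && pvDig (tokens.getD (i+8) 0)
  else false

-- the 'for j in range(i+1, len(tokens))' loop of es_decimal, with the encontrado_punto flag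
def decLoop (tokens : List Int) (j : Nat) (enc : Bool) : Bool :=
  if _h : j < tokens.length then
    if tokens.getD j 0 = 46 then (if enc then false else decLoop tokens (j+1) true)
    else if pvDig (tokens.getD j 0) then decLoop tokens (j+1) enc
    else false
  else enc
termination_by tokens.length - j

def esDecimal (tokens : List Int) (i : Nat) : Bool :=
  if i + 1 < tokens.length ∧ pvDig (tokens.getD i 0) = true then decLoop tokens (i+1) false
  else false

-- the 'for j in range(i+1, len(tokens))' loop of es_entero
def entLoop (tokens : List Int) (j : Nat) : Bool :=
  if _h : j < tokens.length then
    if pvDig (tokens.getD j 0) then entLoop tokens (j+1) else false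
  else true
termination_by tokens.length - j

def esEntero (tokens : List Int) (i : Nat) : Bool :=
  if i < tokens.length ∧ pvDig (tokens.getD i 0) = true then entLoop tokens (i+1)
  else false

-- 'while i < len(tokens) and (digit or tokens[i]==46): i += 1'
def consDec (tokens : List Int) (i : Nat) : Nat :=
  if _h : i < tokens.length then
    if pvDig (tokens.getD i 0) || decide (tokens.getD i 0 = 46) then consDec tokens (i+1) else i
  else i
termination_by tokens.length - i

-- 'while i < len(tokens) and digit: i += 1'
def consInt (tokens : List Int) (i : Nat) : Nat :=
  if _h : i < tokens.length then
    if pvDig (tokens.getD i 0) then consInt tokens (i+1) else i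
  else i
termination_by tokens.length - i

-- the outer 'while i < len(tokens)' loop; fuel = tokens.length suffices (i grows each round)
def loopA (tokens : List Int) : Nat → Nat → List Int
  | 0, _ => []
  | f+1, i =>
    if i < tokens.length then
      let c := tokens.getD i 0
      if (65 ≤ c ∧ c ≤ 90) ∨ (97 ≤ c ∧ c ≤ 122) then 200 :: loopA tokens f (i+1)
      else if 48 ≤ c ∧ c ≤ 57 then
        if esFecha tokens i then 300 :: loopA tokens f (i+9+1)
        else if esDecimal tokens i then 202 :: loopA tokens f ((consDec tokens i - 1) + 1)
        else if esEntero tokens i then 201 :: loopA tokens f ((consInt tokens i - 1) + 1)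
        else 201 :: loopA tokens f (i+1)
      else if c = 33 ∨ c = 35 ∨ c = 36 ∨ c = 37 then 888 :: loopA tokens f (i+1)
      else c :: loopA tokens f (i+1)
    else []

def tokenizar_cadena (tokens : List Int) : List Int := loopA tokens tokens.length 0

-- ===== PORT B =====
-- reverse pass of Source B: entry j of the first list is suf_int[j], of the second suf_dec[j]
def bSuf (tokens : List Int) : List Bool × List Bool :=
  match tokens with
  | [] => ([true], [false])
  | c :: rest =>
      let p := bSuf rest
      let d := pvDig c
      ((d && p.1.headD false) :: p.1,
       ((d && p.2.headD false) || (decide (c = 46) && p.1.headD false)) :: p.2)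

def loopB (tokens : List Int) (si sd : List Bool) : Nat → Nat → List Int
  | 0, _ => []
  | f+1, i =>
    if i < tokens.length then
      let c := tokens.getD i 0
      if (65 ≤ c ∧ c ≤ 90) ∨ (97 ≤ c ∧ c ≤ 122) then 200 :: loopB tokens si sd f (i+1)
      else if 48 ≤ c ∧ c ≤ 57 then
        if i + 9 < tokens.length ∧
           (pvDig (tokens.getD (i+1) 0) && decide (tokens.getD (i+2) 0 = 47) &&
            pvDig (tokens.getD (i+3) 0) && decide (tokens.getD (i+4) 0 = 47) &&
            pvDig (tokens.getD (i+5) 0) && pvDig (tokens.getD (i+6) 0) &&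
            pvDig (tokens.getD (i+7) 0) && pvDig (tokens.getD (i+8) 0)) = true
        then 300 :: loopB tokens si sd f (i+10)
        else if sd.getD (i+1) false then 202 :: loopB tokens si sd f tokens.length
        else if si.getD (i+1) false then 201 :: loopB tokens si sd f tokens.length
        else 201 :: loopB tokens si sd f (i+1)
      else if c = 33 ∨ c = 35 ∨ c = 36 ∨ c = 37 then 888 :: loopB tokens si sd f (i+1)
      else c :: loopB tokens si sd f (i+1)
    else []

def tokenizar_cadena_alt (tokens : List Int) : List Int :=
  let p := bSuf tokens
  loopB tokens p.1 p.2 tokens.length 0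

-- ===== PRECONDITION & SPEC =====
def Spec_tokenizar_cadena (tokens : List Int) (out : List Int) : Prop := out = tokenizar_cadena_alt tokens
instance (tokens : List Int) (out : List Int) : Decidable (Spec_tokenizar_cadena tokens out) := by unfold Spec_tokenizar_cadena; infer_instance

-- ===== CLAIM (what is proved, stated in full; the proofs are below) =====
def Claim_equal_tokenizar_cadena : Prop := ∀ (tokens : List Int), Dom_tokenizar_cadena tokens → Spec_tokenizar_cadena tokens (tokenizar_cadena tokens)

-- ===== LEMMAS AND PROOFS =====

-- spec of suf_dec: all digits with exactly one dot
def decT (l : List Int) : Bool :=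
  match l with
  | [] => false
  | c :: r => if pvDig c then decT r else if c = 46 then r.all pvDig else false

theorem entLoop_eq (tokens : List Int) (j : Nat) :
    entLoop tokens j = (tokens.drop j).all pvDig := by
  unfold entLoop
  by_cases h : j < tokens.length
  · rw [dif_pos h, List.drop_eq_getElem_cons h, List.all_cons,
        entLoop_eq tokens (j+1), List.getD_eq_getElem tokens 0 h]
    cases pvDig tokens[j] <;> simp
  · rw [dif_neg h, List.drop_eq_nil_of_le (by omega)]
    simp
termination_by tokens.length - j
decreasing_by omega

theorem decLoop_eq (tokens : List Int) (j : Nat) :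
    decLoop tokens j true = (tokens.drop j).all pvDig ∧
    decLoop tokens j false = decT (tokens.drop j) := by
  unfold decLoop
  by_cases h : j < tokens.length
  · have ih := decLoop_eq tokens (j+1)
    rw [List.drop_eq_getElem_cons h]
    simp only [dif_pos h, List.all_cons, decT, List.getD_eq_getElem tokens 0 h, ih.1, ih.2]
    by_cases h46 : tokens[j] = (46 : Int)
    · have : pvDig (46 : Int) = false := by decide
      simp [h46, this]
    · simp only [if_neg h46]
      cases hd : pvDig tokens[j] <;> simp [hd]
  · rw [List.drop_eq_nil_of_le (by omega)]
    simp [h, decT]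
termination_by tokens.length - j
decreasing_by all_goals omega

theorem bSuf_fst_head (tokens : List Int) :
    (bSuf tokens).1.headD false = tokens.all pvDig := by
  induction tokens with
  | nil => rfl
  | cons c rest ih => simp only [bSuf, List.headD_cons, List.all_cons, ih]

theorem bSuf_snd_head (tokens : List Int) :
    (bSuf tokens).2.headD false = decT tokens := by
  induction tokens with
  | nil => rfl
  | cons c rest ih =>
    simp only [bSuf, List.headD_cons, decT, ih, bSuf_fst_head]
    by_cases hd : pvDig c = true
    · have h46 : ¬ c = 46 := by intro hc; rw [hc] at hd; exact absurd hd (by decide)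
      simp [hd, h46]
    · replace hd : pvDig c = false := by simpa using hd
      by_cases h46 : c = 46
      · have h2 : pvDig (46 : Int) = false := by decide
        simp [h46, h2]
      · simp [hd, h46]

theorem bSuf_fst (tokens : List Int) (j : Nat) (hj : j ≤ tokens.length) :
    (bSuf tokens).1.getD j false = (tokens.drop j).all pvDig := by
  induction tokens generalizing j with
  | nil =>
    have : j = 0 := by simpa using hj
    subst this; simp [bSuf]
  | cons c rest ih =>
    cases j with
    | zero =>
      simp only [bSuf, List.getD_cons_zero, List.drop_zero, List.all_cons, bSuf_fst_head]
    | succ j => simpa [bSuf] using ih j (by simpa using hj)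

theorem bSuf_snd (tokens : List Int) (j : Nat) (hj : j ≤ tokens.length) :
    (bSuf tokens).2.getD j false = decT (tokens.drop j) := by
  induction tokens generalizing j with
  | nil =>
    have : j = 0 := by simpa using hj
    subst this; simp [bSuf, decT]
  | cons c rest ih =>
    cases j with
    | zero =>
      simp only [bSuf, List.getD_cons_zero, List.drop_zero, decT, bSuf_fst_head, bSuf_snd_head]
      by_cases hd : pvDig c = true
      · have h46 : ¬ c = 46 := by intro hc; rw [hc] at hd; exact absurd hd (by decide)
        simp [hd, h46]
      · replace hd : pvDig c = false := by simpa using hd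
        by_cases h46 : c = 46
        · have h2 : pvDig (46 : Int) = false := by decide
          simp [h46, h2]
        · simp [hd, h46]
    | succ j => simpa [bSuf] using ih j (by simpa using hj)

theorem consDec_eq (tokens : List Int) (i : Nat) (hle : i ≤ tokens.length)
    (h : (tokens.drop i).all (fun c => pvDig c || decide (c = 46)) = true) :
    consDec tokens i = tokens.length := by
  unfold consDec
  by_cases hi : i < tokens.length
  · rw [List.drop_eq_getElem_cons hi, List.all_cons] at h
    rw [dif_pos hi, if_pos (by
      rw [List.getD_eq_getElem tokens 0 hi]
      exact ((Bool.and_eq_true _ _).mp h).1)]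
    exact consDec_eq tokens (i+1) (by omega) ((Bool.and_eq_true _ _).mp h).2
  · rw [dif_neg hi]; omega
termination_by tokens.length - i
decreasing_by omega

theorem consInt_eq (tokens : List Int) (i : Nat) (hle : i ≤ tokens.length)
    (h : (tokens.drop i).all pvDig = true) :
    consInt tokens i = tokens.length := by
  unfold consInt
  by_cases hi : i < tokens.length
  · rw [List.drop_eq_getElem_cons hi, List.all_cons] at h
    rw [dif_pos hi, if_pos (by
      rw [List.getD_eq_getElem tokens 0 hi]
      exact ((Bool.and_eq_true _ _).mp h).1)]
    exact consInt_eq tokens (i+1) (by omega) ((Bool.and_eq_true _ _).mp h).2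
  · rw [dif_neg hi]; omega
termination_by tokens.length - i
decreasing_by omega

theorem decT_all (l : List Int) (h : decT l = true) :
    l.all (fun c => pvDig c || decide (c = 46)) = true := by
  induction l with
  | nil => simp
  | cons c r ih =>
    simp only [decT] at h
    by_cases hd : pvDig c = true
    · simp only [if_pos hd] at h
      simp [hd, ih h]
    · simp only [if_neg hd] at h
      by_cases h46 : c = 46
      · simp only [if_pos h46] at h
        simp only [List.all_cons, h46]
        refine (Bool.and_eq_true _ _).mpr ⟨by decide, ?_⟩
        revert h
        induction r with
        | nil => simp
        | cons x xs ihr => intro hx; simp_all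
      · simp [h46] at h

theorem loop_eq (tokens : List Int) (f i : Nat) :
    loopA tokens f i = loopB tokens (bSuf tokens).1 (bSuf tokens).2 f i := by
  induction f generalizing i with
  | zero => rfl
  | succ f ih =>
    unfold loopA loopB
    by_cases hi : i < tokens.length
    · rw [if_pos hi, if_pos hi]
      by_cases hL : (65 ≤ tokens.getD i 0 ∧ tokens.getD i 0 ≤ 90) ∨
                    (97 ≤ tokens.getD i 0 ∧ tokens.getD i 0 ≤ 122)
      · rw [if_pos hL, if_pos hL, ih]
      · rw [if_neg hL, if_neg hL]
        by_cases hD : 48 ≤ tokens.getD i 0 ∧ tokens.getD i 0 ≤ 57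
        · have hdig : pvDig (tokens.getD i 0) = true := by
            simp only [pvDig, decide_eq_true_eq]
            exact hD
          rw [if_pos hD, if_pos hD]
          have hFe : esFecha tokens i = true ↔ (i + 9 < tokens.length ∧
              (pvDig (tokens.getD (i+1) 0) && decide (tokens.getD (i+2) 0 = 47) &&
               pvDig (tokens.getD (i+3) 0) && decide (tokens.getD (i+4) 0 = 47) &&
               pvDig (tokens.getD (i+5) 0) && pvDig (tokens.getD (i+6) 0) &&
               pvDig (tokens.getD (i+7) 0) && pvDig (tokens.getD (i+8) 0)) = true) := by
            unfold esFecha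
            by_cases h9 : i + 9 < tokens.length
            · rw [if_pos h9, hdig]
              simp only [Bool.true_and]
              exact ⟨fun h => ⟨h9, h⟩, fun h => h.2⟩
            · rw [if_neg h9]
              simp [h9]
          have hDecEq : esDecimal tokens i = (bSuf tokens).2.getD (i+1) false := by
            rw [bSuf_snd tokens (i+1) (by omega)]
            unfold esDecimal
            by_cases h1 : i + 1 < tokens.length
            · rw [if_pos ⟨h1, hdig⟩, (decLoop_eq tokens (i+1)).2]
            · rw [if_neg (by tauto), List.drop_eq_nil_of_le (by omega)]
              rfl
          have hEntEq : esEntero tokens i = (bSuf tokens).1.getD (i+1) false := by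
            rw [bSuf_fst tokens (i+1) (by omega)]
            unfold esEntero
            rw [if_pos ⟨hi, hdig⟩, entLoop_eq tokens (i+1)]
          by_cases hf : esFecha tokens i = true
          · rw [if_pos hf, if_pos (hFe.mp hf)]
            have h10 : i + 9 + 1 = i + 10 := by omega
            rw [h10, ih]
          · rw [if_neg hf, if_neg (fun h => hf (hFe.mpr h))]
            by_cases hd2 : esDecimal tokens i = true
            · rw [if_pos hd2, if_pos (hDecEq ▸ hd2)]
              have hdecT : decT (tokens.drop (i+1)) = true := by
                have h' := hd2
                unfold esDecimal at h'
                by_cases h1 : i + 1 < tokens.length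
                · rwa [if_pos ⟨h1, hdig⟩, (decLoop_eq tokens (i+1)).2] at h'
                · rw [if_neg (by tauto)] at h'
                  exact absurd h' (by simp)
              have hcd : consDec tokens i = tokens.length := by
                apply consDec_eq tokens i (by omega)
                rw [List.drop_eq_getElem_cons hi, List.all_cons]
                refine (Bool.and_eq_true _ _).mpr ⟨?_, decT_all _ hdecT⟩
                rw [← List.getD_eq_getElem tokens 0 hi]
                simp only [Bool.or_eq_true]
                exact Or.inl hdig
              rw [hcd]
              have hlen : tokens.length - 1 + 1 = tokens.length := by omega
              rw [hlen, ih]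
            · rw [if_neg hd2, if_neg (fun h => hd2 (hDecEq ▸ h))]
              by_cases he2 : esEntero tokens i = true
              · rw [if_pos he2, if_pos (hEntEq ▸ he2)]
                have hall : (tokens.drop (i+1)).all pvDig = true := by
                  have h' := he2
                  unfold esEntero at h'
                  rwa [if_pos ⟨hi, hdig⟩, entLoop_eq tokens (i+1)] at h'
                have hci : consInt tokens i = tokens.length := by
                  apply consInt_eq tokens i (by omega)
                  rw [List.drop_eq_getElem_cons hi, List.all_cons]
                  refine (Bool.and_eq_true _ _).mpr ⟨?_, hall⟩
                  rw [← List.getD_eq_getElem tokens 0 hi]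
                  exact hdig
                rw [hci]
                have hlen : tokens.length - 1 + 1 = tokens.length := by omega
                rw [hlen, ih]
              · rw [if_neg he2, if_neg (fun h => he2 (hEntEq ▸ h)), ih]
        · rw [if_neg hD, if_neg hD]
          by_cases hS : tokens.getD i 0 = 33 ∨ tokens.getD i 0 = 35 ∨
                        tokens.getD i 0 = 36 ∨ tokens.getD i 0 = 37
          · rw [if_pos hS, if_pos hS, ih]
          · rw [if_neg hS, if_neg hS, ih]
    · rw [if_neg hi, if_neg hi]

-- ===== VERDICT (by name: the statement is the Claim_ definition above) =====
theorem tokenizar_cadena_spec : Claim_equal_tokenizar_cadena := by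
  intro tokens _
  unfold Spec_tokenizar_cadena tokenizar_cadena tokenizar_cadena_alt
  exact loop_eq tokens tokens.length 0
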